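-- pv_equiv track=rewrite | github.com/ziminl/python-korean-lib | idea.py | convert_to_korean
-- ===== SOURCE A (Python) =====
-- def convert_to_korean(input_string):
--     korean_dict = {
--         'q': 'ㅂ',
--         'w': 'ㅈ',
--         'e': 'ㄷ'
--     }
--
--     output_string = ''
--     for char in input_string:
--         if char.lower() in korean_dict:
--             output_string += korean_dict[char.lower()]
--         else:
--             output_string += char
--
--     return output_string
-- ===== SOURCE B (Python) =====
-- def convert_to_korean(input_string):
--     return (input_string
--             .replace('q', 'ㅂ').replace('Q', 'ㅂ')
--             .replace('w', 'ㅈ').replace('W', 'ㅈ')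
--             .replace('e', 'ㄷ').replace('E', 'ㄷ'))
-- ===== Notes on version B (the rewrite author's own statement) =====
-- stated objective: faster
-- what changed: Replaced the per-character loop with dict lookup on char.lower() by a chain of six whole-string replace passes (lower- and upper-case source chars), removing the loop, the dict and the lowercasing.
import Mathlib
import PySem

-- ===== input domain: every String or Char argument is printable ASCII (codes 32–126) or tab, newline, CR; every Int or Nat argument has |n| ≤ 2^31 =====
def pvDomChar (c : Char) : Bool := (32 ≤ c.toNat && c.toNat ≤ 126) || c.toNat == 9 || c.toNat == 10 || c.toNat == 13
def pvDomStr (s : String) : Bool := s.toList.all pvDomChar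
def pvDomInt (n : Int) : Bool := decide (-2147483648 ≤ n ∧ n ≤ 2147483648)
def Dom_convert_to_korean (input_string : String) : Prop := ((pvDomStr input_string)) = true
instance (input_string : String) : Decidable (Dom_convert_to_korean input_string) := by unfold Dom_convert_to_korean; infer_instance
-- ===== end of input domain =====

-- B replaces A's per-character loop + dict lookup on char.lower() by six whole-string replace passes (constant-factor faster: bulk passes instead of a per-char loop).


-- ===== PORT A =====
-- the literal dict {'q': 'ㅂ', 'w': 'ㅈ', 'e': 'ㄷ'} (keys/values as 1-char strings = List Char)
def pvKdict : PySem.Dict (List Char) (List Char) :=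
  ((PySem.Dict.empty.insert ['q'] ['ㅂ']).insert ['w'] ['ㅈ']).insert ['e'] ['ㄷ']

-- loop: for char in input_string: membership test on char.lower(), append the value or the char
def convert_to_korean (input_string : String) : String :=
  String.ofList (input_string.toList.foldl (fun out c =>
    match pvKdict.get? (PySem.Chars.lower [c]) with
    | some v => out ++ v
    | none => out ++ [c]) [])

-- ===== PORT B =====
def convert_to_korean_alt (input_string : String) : String :=
  PySem.Str.replace (PySem.Str.replace (PySem.Str.replace (PySem.Str.replace
    (PySem.Str.replace (PySem.Str.replace input_string "q" "ㅂ") "Q" "ㅂ")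
    "w" "ㅈ") "W" "ㅈ") "e" "ㄷ") "E" "ㄷ"

-- ===== PRECONDITION & SPEC =====
def Spec_convert_to_korean (input_string : String) (out : String) : Prop := out = convert_to_korean_alt input_string
instance (input_string : String) (out : String) : Decidable (Spec_convert_to_korean input_string out) := by unfold Spec_convert_to_korean; infer_instance

-- ===== CLAIM (what is proved, stated in full; the proofs are below) =====
def Claim_equal_convert_to_korean : Prop := ∀ (input_string : String), Dom_convert_to_korean input_string → Spec_convert_to_korean input_string (convert_to_korean input_string)

-- ===== LEMMAS AND PROOFS =====

-- single-character substitution, the effect of one replace pass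
def pvSub (o k c : Char) : Char := if c = o then k else c

-- the six passes of B composed, as one char function
def pvG (c : Char) : Char :=
  pvSub 'E' 'ㄷ' (pvSub 'e' 'ㄷ' (pvSub 'W' 'ㅈ' (pvSub 'w' 'ㅈ' (pvSub 'Q' 'ㅂ' (pvSub 'q' 'ㅂ' c)))))

-- A's per-character step (what one loop iteration appends)
def pvStepA (c : Char) : List Char :=
  match pvKdict.get? (PySem.Chars.lower [c]) with
  | some v => v
  | none => [c]

theorem pv_go_single (o k : Char) : ∀ (l : List Char) (fuel : Nat) (acc : List Char),
    l.length ≤ fuel →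
    PySem.Chars.replace.go [o] [k] fuel l acc = acc.reverse ++ l.map (pvSub o k) := by
  intro l
  induction l with
  | nil =>
    intro fuel acc _
    cases fuel <;> simp [PySem.Chars.replace.go]
  | cons c t ih =>
    intro fuel acc hf
    cases fuel with
    | zero => simp at hf
    | succ fuel =>
      simp only [PySem.Chars.replace.go]
      by_cases hc : c = o
      · subst hc
        have hp : List.isPrefixOf [c] (c :: t) = true := by
          simp [List.isPrefixOf]
        simp only [hp, if_pos]
        rw [show List.drop [c].length (c :: t) = t from rfl,
            show ([k].reverse ++ acc) = k :: acc from rfl,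
            ih fuel (k :: acc) (by simpa using Nat.le_of_succ_le_succ hf)]
        simp [pvSub]
      · have hp : List.isPrefixOf [o] (c :: t) = false := by
          simp [List.isPrefixOf]; exact fun h => absurd h.symm hc
        simp only [hp]
        rw [ih fuel (c :: acc) (by simpa using Nat.le_of_succ_le_succ hf)]
        simp [pvSub, hc]

theorem pv_replace_single (s : List Char) (o k : Char) :
    PySem.Chars.replace s [o] [k] = s.map (pvSub o k) := by
  unfold PySem.Chars.replace
  simp [pv_go_single o k s s.length [] (Nat.le_refl _)]

-- on every domain character, A's step appends exactly the character B's passes produce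
theorem pv_step_eq_nat : ∀ n, n < 127 → pvStepA (Char.ofNat n) = [pvG (Char.ofNat n)] := by decide

theorem pv_step_eq (c : Char) (hc : pvDomChar c = true) : pvStepA c = [pvG c] := by
  have hn : c.toNat < 127 := by
    simp only [pvDomChar, Bool.or_eq_true, Bool.and_eq_true, decide_eq_true_eq,
      beq_iff_eq] at hc
    omega
  have := pv_step_eq_nat c.toNat hn
  rwa [Char.ofNat_toNat] at this

theorem pv_flatMap_eq_map (l : List Char) (h : ∀ c ∈ l, pvStepA c = [pvG c]) :
    l.flatMap pvStepA = l.map pvG := by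
  induction l with
  | nil => rfl
  | cons c t ih =>
    simp only [List.flatMap_cons, List.map_cons, h c (by simp)]
    rw [ih (fun x hx => h x (by simp [hx]))]
    rfl

-- ===== VERDICT (by name: the statement is the Claim_ definition above) =====
theorem convert_to_korean_spec : Claim_equal_convert_to_korean := by
  intro s hdom
  unfold Spec_convert_to_korean
  apply String.ext
  have hB : (convert_to_korean_alt s).toList = s.toList.map pvG := by
    unfold convert_to_korean_alt pvG
    simp only [PySem.Str.toList_replace]
    rw [show ("q":String).toList = ['q'] from rfl, show ("Q":String).toList = ['Q'] from rfl,
        show ("w":String).toList = ['w'] from rfl, show ("W":String).toList = ['W'] from rfl,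
        show ("e":String).toList = ['e'] from rfl, show ("E":String).toList = ['E'] from rfl,
        show ("ㅂ":String).toList = ['ㅂ'] from rfl, show ("ㅈ":String).toList = ['ㅈ'] from rfl,
        show ("ㄷ":String).toList = ['ㄷ'] from rfl]
    rw [pv_replace_single, pv_replace_single, pv_replace_single,
        pv_replace_single, pv_replace_single, pv_replace_single]
    simp [List.map_map, Function.comp]
  rw [hB]
  have hA : (convert_to_korean s).toList = s.toList.flatMap pvStepA := by
    unfold convert_to_korean
    have hfun : (fun (out : List Char) (c : Char) =>
        match pvKdict.get? (PySem.Chars.lower [c]) with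
        | some v => out ++ v
        | none => out ++ [c]) = fun out c => out ++ pvStepA c := by
      funext out c
      unfold pvStepA
      cases hx : pvKdict.get? (PySem.Chars.lower [c]) <;> simp
    rw [hfun, PySem.List.foldl_append_eq_flatMap]
    simp [String.toList_ofList]
  rw [hA]
  apply pv_flatMap_eq_map
  intro c hc
  exact pv_step_eq c (by
    have := hdom
    unfold Dom_convert_to_korean pvDomStr at this
    exact List.all_eq_true.mp this c hc)
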